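-- pv_equiv track=rewrite | github.com/Fodders-Dev/VPN-Wizard | src/vpn_wizard/core.py | _parse_wg_show
-- ===== SOURCE A (Python) =====
-- def _parse_wg_show(output: str) -> dict[str, dict]:
--     peers: dict[str, dict] = {}
--     current = None
--     for raw in output.splitlines():
--         line = raw.strip()
--         if line.startswith("peer:"):
--             current = line.split(":", 1)[1].strip()
--             peers[current] = {}
--             continue
--         if not current or not line:
--             continue
--         if line.startswith("endpoint:"):
--             peers[current]["endpoint"] = line.split(":", 1)[1].strip()
--         elif line.startswith("latest handshake:"):
--             peers[current]["latest_handshake"] = line.split(":", 1)[1].strip()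
--         elif line.startswith("transfer:"):
--             transfer = line.split(":", 1)[1].strip()
--             parts = [part.strip() for part in transfer.split(",")]
--             rx = parts[0].replace(" received", "").strip() if parts else ""
--             tx = parts[1].replace(" sent", "").strip() if len(parts) > 1 else ""
--             if rx:
--                 peers[current]["transfer_rx"] = rx
--             if tx:
--                 peers[current]["transfer_tx"] = tx
--     return peers
-- ===== SOURCE B (Python) =====
-- _FIELDS = (("endpoint:", "endpoint"), ("latest handshake:", "latest_handshake"))
--
--
-- def _parse_wg_show(output: str) -> dict[str, dict]:
--     # Phase 1: group stripped lines into peer blocks (lines before the first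
--     # peer header, blank lines, and lines under an empty peer key are dropped).
--     blocks: list[tuple[str, list[str]]] = []
--     for raw in output.splitlines():
--         line = raw.strip()
--         if line.startswith("peer:"):
--             blocks.append((line[len("peer:"):].strip(), []))
--         elif blocks and blocks[-1][0] and line:
--             blocks[-1][1].append(line)
--     # Phase 2: parse each block; a repeated peer key overwrites the earlier one.
--     return {key: _parse_block(lines) for key, lines in blocks}
--
--
-- def _parse_block(lines: list[str]) -> dict:
--     fields: dict[str, str] = {}
--     for line in lines:
--         hit = next(((p, n) for p, n in _FIELDS if line.startswith(p)), None)
--         if hit is not None: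
--             fields[hit[1]] = line[len(hit[0]):].strip()
--         elif line.startswith("transfer:"):
--             value = line[len("transfer:"):].strip()
--             parts = [part.strip() for part in value.split(",")]
--             rx = parts[0].replace(" received", "").strip() if parts else ""
--             tx = parts[1].replace(" sent", "").strip() if len(parts) > 1 else ""
--             if rx:
--                 fields["transfer_rx"] = rx
--             if tx:
--                 fields["transfer_tx"] = tx
--     return fields
-- ===== Notes on version B (the rewrite author's own statement) =====
-- stated objective: alternative
-- what changed: Replaces A's single streaming loop that tracks the active peer while mutating the result dict by a two-phase pipeline: one pass groups the stripped lines into peer blocks, and a second pass parses each block into a field dict via a prefix table and slicing (no repeated split-on-colon), inserting it so a repeated peer key overwrites the earlier entry.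
import Mathlib
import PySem

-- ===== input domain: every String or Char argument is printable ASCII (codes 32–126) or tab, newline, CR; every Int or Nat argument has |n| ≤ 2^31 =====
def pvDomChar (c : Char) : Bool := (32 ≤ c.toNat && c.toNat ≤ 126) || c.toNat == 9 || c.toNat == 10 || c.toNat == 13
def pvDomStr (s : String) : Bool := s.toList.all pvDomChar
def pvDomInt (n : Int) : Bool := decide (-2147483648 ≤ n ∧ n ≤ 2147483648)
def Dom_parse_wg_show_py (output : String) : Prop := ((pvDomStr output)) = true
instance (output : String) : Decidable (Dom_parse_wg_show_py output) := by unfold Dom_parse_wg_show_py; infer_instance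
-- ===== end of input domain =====

-- B restructures A's single streaming loop into two passes (group the lines into peer
-- blocks, then parse each block via a prefix table); return values are proved equal.

-- sub-expressions of the transfer parsing, shared verbatim by both Pythons:
-- [part.strip() for part in value.split(",")]
def pvParts (value : String) : List String :=
  ((PySem.Str.split? value ",").getD []).map PySem.Str.strip
-- parts[0].replace(" received", "").strip() if parts else ""
def pvRx (parts : List String) : String :=
  if parts ≠ [] then PySem.Str.strip (PySem.Str.replace (parts.getD 0 "") " received" "") else ""
-- parts[1].replace(" sent", "").strip() if len(parts) > 1 else ""
def pvTx (parts : List String) : String :=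
  if parts.length > 1 then PySem.Str.strip (PySem.Str.replace (parts.getD 1 "") " sent" "") else ""

-- ===== PORT A =====
-- line.split(":", 1)[1].strip() — index 1 always exists at the call sites because
-- the startswith-tested prefix contains ':'
def pvAfterColon (line : String) : String :=
  PySem.Str.strip (((PySem.Str.splitMax? line ":" 1).getD []).getD 1 "")

def pvAStep (st : PySem.Dict String (PySem.Dict String String) × Option String)
    (raw : String) : PySem.Dict String (PySem.Dict String String) × Option String :=
  let peers := st.1
  let line := PySem.Str.strip raw
  if PySem.Str.startswith line "peer:" then
    let c := pvAfterColon line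
    (peers.insert c PySem.Dict.empty, some c)
  else
    match st.2 with
    | none => (peers, st.2)
    | some c =>
      if c = "" ∨ line = "" then (peers, st.2)
      else if PySem.Str.startswith line "endpoint:" then
        (peers.modify c PySem.Dict.empty (fun d => d.insert "endpoint" (pvAfterColon line)), st.2)
      else if PySem.Str.startswith line "latest handshake:" then
        (peers.modify c PySem.Dict.empty (fun d => d.insert "latest_handshake" (pvAfterColon line)), st.2)
      else if PySem.Str.startswith line "transfer:" then
        let parts := pvParts (pvAfterColon line)
        let rx := pvRx parts
        let tx := pvTx parts
        let peers := if rx ≠ "" then peers.modify c PySem.Dict.empty (fun d => d.insert "transfer_rx" rx) else peers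
        let peers := if tx ≠ "" then peers.modify c PySem.Dict.empty (fun d => d.insert "transfer_tx" tx) else peers
        (peers, st.2)
      else (peers, st.2)

def parse_wg_show_py (output : String) : List (String × List (String × String)) :=
  let st := (PySem.Str.splitlines output).foldl pvAStep (PySem.Dict.empty, none)
  st.1.items.map (fun p => (p.1, p.2.items))

-- ===== PORT B =====
def pvFieldSpecs : List (String × String) :=
  [("endpoint:", "endpoint"), ("latest handshake:", "latest_handshake")]

def pvAltFieldStep (fields : PySem.Dict String String) (line : String) :
    PySem.Dict String String :=
  -- next(((p, n) for p, n in _FIELDS if line.startswith(p)), None)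
  match pvFieldSpecs.find? (fun pr => PySem.Str.startswith line pr.1) with
  | some pr =>
    fields.insert pr.2 (PySem.Str.strip (PySem.Str.slice line (some (PySem.Str.len pr.1)) none))
  | none =>
    if PySem.Str.startswith line "transfer:" then
      let parts := pvParts (PySem.Str.strip (PySem.Str.slice line (some (PySem.Str.len "transfer:")) none))
      let rx := pvRx parts
      let tx := pvTx parts
      let fields := if rx ≠ "" then fields.insert "transfer_rx" rx else fields
      if tx ≠ "" then fields.insert "transfer_tx" tx else fields
    else fields

def pvParseBlock (lines : List String) : PySem.Dict String String :=
  lines.foldl pvAltFieldStep PySem.Dict.empty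

-- phase 1: blocks.append((key, [])) / blocks[-1][1].append(line), via getLast?/dropLast
def pvGroupStep (blocks : List (String × List String)) (raw : String) :
    List (String × List String) :=
  let line := PySem.Str.strip raw
  if PySem.Str.startswith line "peer:" then
    blocks ++ [(PySem.Str.strip (PySem.Str.slice line (some (PySem.Str.len "peer:")) none), [])]
  else
    match blocks.getLast? with
    | none => blocks
    | some (k, ls) =>
      if k ≠ "" ∧ line ≠ "" then blocks.dropLast ++ [(k, ls ++ [line])] else blocks

def parse_wg_show_py_alt (output : String) : List (String × List (String × String)) :=
  let blocks := (PySem.Str.splitlines output).foldl pvGroupStep []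
  let peers := blocks.foldl (fun peers b => peers.insert b.1 (pvParseBlock b.2))
    (PySem.Dict.empty : PySem.Dict String (PySem.Dict String String))
  peers.items.map (fun p => (p.1, p.2.items))

-- ===== PRECONDITION & SPEC =====
def Spec_parse_wg_show_py (output : String) (out : List (String × List (String × String))) : Prop := out = parse_wg_show_py_alt output
instance (output : String) (out : List (String × List (String × String))) : Decidable (Spec_parse_wg_show_py output out) := by unfold Spec_parse_wg_show_py; infer_instance

-- ===== CLAIM (what is proved, stated in full; the proofs are below) =====
def Claim_equal_parse_wg_show_py : Prop := ∀ (output : String), Dom_parse_wg_show_py output → Spec_parse_wg_show_py output (parse_wg_show_py output)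

-- ===== LEMMAS AND PROOFS =====

-- characterization of str.split(":", 1): the fueled go loop, at maxsplit 0 and 1
theorem pv_go_zero (f : ℕ) (b cur : List Char) (acc : List (List Char)) :
    PySem.Chars.splitOnMax.go [':'] f 0 b cur acc = ((cur.reverse ++ b) :: acc).reverse := by
  cases f <;> cases b <;> simp [PySem.Chars.splitOnMax.go]

theorem pv_go_one (h : List Char) (f : ℕ) (b cur : List Char) (acc : List (List Char))
    (hc : ':' ∉ h) (hf : h.length < f) :
    PySem.Chars.splitOnMax.go [':'] f 1 (h ++ ':' :: b) cur acc
      = (b :: (cur.reverse ++ h) :: acc).reverse := by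
  induction h generalizing f cur acc with
  | nil =>
    obtain ⟨f, rfl⟩ : ∃ f', f = f' + 1 := ⟨f - 1, by omega⟩
    simp [PySem.Chars.splitOnMax.go, List.isPrefixOf, pv_go_zero]
  | cons c h ih =>
    obtain ⟨f, rfl⟩ : ∃ f', f = f' + 1 := ⟨f - 1, by omega⟩
    have hpre : ([':'].isPrefixOf (c :: (h ++ ':' :: b))) = false := by
      simp [List.isPrefixOf]
      exact fun hcc => absurd hcc.symm (fun hcc' => hc (by simp [hcc']))
    rw [show (c :: h) ++ ':' :: b = c :: (h ++ ':' :: b) from rfl]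
    simp only [PySem.Chars.splitOnMax.go, hpre]
    rw [if_neg (by norm_num), if_neg (by simp)]
    rw [ih _ _ _ (fun hm => hc (List.mem_cons_of_mem _ hm)) (by simp at hf ⊢; omega)]
    simp

-- A's line.split(":", 1)[1].strip() equals B's line[len(p):].strip() whenever line
-- starts with p and p's only colon is its last character
theorem pv_afterColon_eq_slice (line p : String)
    (hsw : PySem.Chars.startswith line.toList p.toList = true)
    (hne : p.toList ≠ []) (hlast : p.toList.getLast hne = ':')
    (hc : ':' ∉ p.toList.dropLast) :
    pvAfterColon line = PySem.Str.strip (PySem.Str.slice line (some (PySem.Str.len p)) none) := by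
  obtain ⟨rest, hrest⟩ := (PySem.Chars.startswith_iff _ _).mp hsw
  have hdec : p.toList = p.toList.dropLast ++ [':'] := by
    conv_lhs => rw [← List.dropLast_concat_getLast hne]
    rw [hlast]
  have hline : line.toList = p.toList.dropLast ++ ':' :: rest := by
    rw [← hrest, hdec]; simp
  have hsplit : PySem.Chars.splitMax? line.toList [':'] 1
      = some [p.toList.dropLast, rest] := by
    unfold PySem.Chars.splitMax? PySem.Chars.splitOnMax
    rw [show Int.toNat 1 = 1 from rfl, hline, pv_go_one _ _ _ _ _ hc (by simp)]
    simp
  have h2 := congrArg List.length hdec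
  simp at h2
  have hlen : PySem.Str.len p = ((p.toList.dropLast.length + 1 : ℕ) : ℤ) := by
    simp
    omega
  have hsl : PySem.Chars.slice line.toList (some ((p.toList.dropLast.length + 1 : ℕ) : ℤ)) none
      = rest := by
    rw [PySem.Chars.slice_eq_listSlice, PySem.List.slice_from _ (by positivity), hline]
    rw [show p.toList.dropLast ++ ':' :: rest = (p.toList.dropLast ++ [':']) ++ rest from by simp]
    have hl2 : (p.toList.dropLast ++ [':']).length = p.toList.dropLast.length + 1 := by simp
    rw [Int.toNat_natCast, ← hl2, List.drop_left]
  have hslice : PySem.Str.slice line (some (PySem.Str.len p)) none = String.ofList rest := by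
    unfold PySem.Str.slice
    rw [hlen, hsl]
  rw [hslice]
  unfold pvAfterColon PySem.Str.splitMax?
  rw [show (":" : String).toList = [':'] from rfl, hsplit]
  simp

-- B's second phase as a fold from an arbitrary dict
def pvBuild (d : PySem.Dict String (PySem.Dict String String))
    (blocks : List (String × List String)) : PySem.Dict String (PySem.Dict String String) :=
  blocks.foldl (fun peers b => peers.insert b.1 (pvParseBlock b.2)) d

theorem pvBuild_concat (d : PySem.Dict String (PySem.Dict String String))
    (bs : List (String × List String)) (b : String × List String) :
    pvBuild d (bs ++ [b]) = (pvBuild d bs).insert b.1 (pvParseBlock b.2) := by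
  simp [pvBuild, List.foldl_append]

theorem pvParseBlock_concat (ls : List String) (line : String) :
    pvParseBlock (ls ++ [line]) = pvAltFieldStep (pvParseBlock ls) line := by
  simp [pvParseBlock, List.foldl_append]

theorem pv_modify_insert (F : PySem.Dict String (PySem.Dict String String)) (k : String)
    (P : PySem.Dict String String) (f : PySem.Dict String String → PySem.Dict String String) :
    (F.insert k P).modify k PySem.Dict.empty f = F.insert k (f P) := by
  simp [PySem.Dict.modify, PySem.Dict.getD_insert_self, PySem.Dict.insert_insert_self]

-- one step of A's loop, on the state B's grouping so far determines, is one grouping step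
theorem pvStep (d : PySem.Dict String (PySem.Dict String String))
    (blocks : List (String × List String)) (raw : String) :
    pvAStep (pvBuild d blocks, (blocks.getLast?).map Prod.fst) raw
      = (pvBuild d (pvGroupStep blocks raw), ((pvGroupStep blocks raw).getLast?).map Prod.fst) := by
  by_cases hp : PySem.Chars.startswith (PySem.Chars.strip raw.toList) ['p','e','e','r',':'] = true
  · have e := pv_afterColon_eq_slice (PySem.Str.strip raw) "peer:" (by simpa using hp)
      (by decide) (by decide) (by decide)
    unfold pvAStep pvGroupStep
    simp [hp, pvParseBlock, e, pvBuild_concat]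
  · rcases blocks.eq_nil_or_concat with rfl | ⟨bs, ⟨k, ls⟩, rfl⟩
    · unfold pvAStep pvGroupStep
      simp [hp, pvBuild]
    · unfold pvAStep pvGroupStep
      by_cases hk : k = ""
      · simp [hp, hk]
      · by_cases hl : PySem.Str.strip raw = ""
        · simp [hp, hk, hl, PySem.Chars.startswith]
        · by_cases h1 : PySem.Chars.startswith (PySem.Chars.strip raw.toList)
              ['e','n','d','p','o','i','n','t',':'] = true
          · have e := pv_afterColon_eq_slice (PySem.Str.strip raw) "endpoint:" (by simpa using h1)
              (by decide) (by decide) (by decide)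
            simp [hp, hk, hl, h1, pvFieldSpecs, pvAltFieldStep, e, pv_modify_insert,
              pvBuild_concat, pvParseBlock_concat]
          · by_cases h2 : PySem.Chars.startswith (PySem.Chars.strip raw.toList)
                ['l','a','t','e','s','t',' ','h','a','n','d','s','h','a','k','e',':'] = true
            · have e := pv_afterColon_eq_slice (PySem.Str.strip raw) "latest handshake:"
                (by simpa using h2) (by decide) (by decide) (by decide)
              simp [hp, hk, hl, h1, h2, pvFieldSpecs, pvAltFieldStep, e, pv_modify_insert,
                pvBuild_concat, pvParseBlock_concat]
            · by_cases h3 : PySem.Chars.startswith (PySem.Chars.strip raw.toList)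
                  ['t','r','a','n','s','f','e','r',':'] = true
              · have e := pv_afterColon_eq_slice (PySem.Str.strip raw) "transfer:"
                  (by simpa using h3) (by decide) (by decide) (by decide)
                simp [hp, hk, hl, h1, h2, h3, pvFieldSpecs, pvAltFieldStep, e,
                  pvBuild_concat, pvParseBlock_concat]
                split_ifs <;> simp [pv_modify_insert]
              · simp [hp, hk, hl, h1, h2, h3, pvFieldSpecs, pvAltFieldStep,
                  pvBuild_concat, pvParseBlock_concat]

theorem pvLoop (lines : List String) (d : PySem.Dict String (PySem.Dict String String))
    (blocks : List (String × List String)) :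
    lines.foldl pvAStep (pvBuild d blocks, (blocks.getLast?).map Prod.fst)
      = (pvBuild d (lines.foldl pvGroupStep blocks),
         ((lines.foldl pvGroupStep blocks).getLast?).map Prod.fst) := by
  induction lines generalizing blocks with
  | nil => rfl
  | cons raw rest ih => rw [List.foldl_cons, pvStep, List.foldl_cons]; exact ih _

-- ===== VERDICT (by name: the statement is the Claim_ definition above) =====
theorem parse_wg_show_py_spec : Claim_equal_parse_wg_show_py := by
  intro output _
  unfold Spec_parse_wg_show_py parse_wg_show_py parse_wg_show_py_alt
  have h := pvLoop (PySem.Str.splitlines output) PySem.Dict.empty []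
  simp only [pvBuild, List.foldl_nil, List.getLast?_nil, Option.map_none] at h
  rw [h]
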